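-- pv_equiv track=rewrite | github.com/kompeet/Python | Exercises/interview_kit/string_manipulation/making_anagrams.py | make_anagram
-- ===== SOURCE A (Python) =====
-- def make_anagram(a, b):
--     delete_sum = 0
--     dict_str = {}
--     for i in a:
--         dict_str[i] = dict_str.get(i, 0) + 1
--     for j in b:
--         if dict_str.get(j, 0) != 0:
--             dict_str[j] -= 1
--         else:
--             delete_sum += 1
--     return delete_sum + sum(dict_str.values())
-- ===== SOURCE B (Python) =====
-- def make_anagram(a, b):
--     # For each distinct character of either string, the deletions needed are
--     # the absolute difference of its occurrence counts in a and b.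
--     return sum(abs(a.count(c) - b.count(c)) for c in set(a + b))
-- ===== Notes on version B (the rewrite author's own statement) =====
-- stated objective: simpler
-- what changed: Replaces A's mutable dict built from a and consumed by a decrement-or-count pass over b with a one-line sum of absolute per-character count differences over the distinct characters of a+b.
import Mathlib
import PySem

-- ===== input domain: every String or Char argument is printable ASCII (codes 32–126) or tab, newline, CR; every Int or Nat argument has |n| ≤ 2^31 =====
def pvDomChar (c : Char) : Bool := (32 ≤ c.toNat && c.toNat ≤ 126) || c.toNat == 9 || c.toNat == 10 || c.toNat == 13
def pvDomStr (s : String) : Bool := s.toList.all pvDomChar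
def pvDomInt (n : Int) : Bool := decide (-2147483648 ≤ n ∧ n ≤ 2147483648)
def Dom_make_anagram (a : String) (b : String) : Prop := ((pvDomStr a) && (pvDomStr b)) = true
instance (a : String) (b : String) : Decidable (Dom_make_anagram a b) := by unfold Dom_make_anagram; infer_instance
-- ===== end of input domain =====

-- B replaces A's consume-and-decrement dict pass with a direct sum of absolute per-character
-- count differences over the distinct characters of a+b (simpler, not faster).

-- ===== PORT A =====
-- one step of A's loop over b: if dict_str.get(j,0) != 0: dict_str[j] -= 1 else: delete_sum += 1
-- (under the guard the key is present, so `dict_str[j] - 1` equals `getD j 0 - 1` exactly)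
def pvStepA (p : Int × PySem.Dict Char Int) (j : Char) : Int × PySem.Dict Char Int :=
  if p.2.getD j 0 ≠ 0 then (p.1, p.2.insert j (p.2.getD j 0 - 1)) else (p.1 + 1, p.2)

def make_anagram (a : String) (b : String) : Int :=
  let d0 : PySem.Dict Char Int :=
    a.toList.foldl (fun d i => d.insert i (d.getD i 0 + 1)) PySem.Dict.empty
  let r := b.toList.foldl pvStepA ((0 : Int), d0)
  r.1 + r.2.values.sum

-- ===== PORT B =====
-- a.count(c) for a single character c is exactly the character count List.count;
-- set(a + b) is PySem.Set.ofList of the concatenated character lists; sum over a set is order-insensitive.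
def make_anagram_alt (a : String) (b : String) : Int :=
  ((PySem.Set.ofList (a.toList ++ b.toList)).map
    (fun c => |(a.toList.count c : Int) - (b.toList.count c : Int)|)).sum

-- ===== PRECONDITION & SPEC =====
def Spec_make_anagram (a : String) (b : String) (out : Int) : Prop := out = make_anagram_alt a b
instance (a : String) (b : String) (out : Int) : Decidable (Spec_make_anagram a b out) := by unfold Spec_make_anagram; infer_instance

-- ===== CLAIM (what is proved, stated in full; the proofs are below) =====
def Claim_equal_make_anagram : Prop := ∀ (a : String) (b : String), Dom_make_anagram a b → Spec_make_anagram a b (make_anagram a b)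

-- ===== LEMMAS AND PROOFS =====

-- a sum over a nodup list K extends to a nodup superlist S when the summand vanishes off K
lemma sum_map_extend (f : Char → Int) (K S : List Char) (hK : K.Nodup) (hS : S.Nodup)
    (hsub : ∀ c ∈ K, c ∈ S) (hz : ∀ c ∈ S, c ∉ K → f c = 0) :
    (K.map f).sum = (S.map f).sum := by
  rw [← List.sum_toFinset f hK, ← List.sum_toFinset f hS]
  apply Finset.sum_subset
  · intro x hx; simp only [List.mem_toFinset] at *; exact hsub x hx
  · intro x hx hnx; simp only [List.mem_toFinset] at *; exact hz x hx hnx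

lemma loopA_eval (S : List Char) (hS : S.Nodup) :
    ∀ (bs : List Char), (∀ c ∈ bs, c ∈ S) →
    ∀ (d : PySem.Dict Char Int) (s : Int),
      d.keys.Nodup → (∀ k ∈ d.keys, k ∈ S) → (∀ c, 0 ≤ d.getD c 0) →
      (bs.foldl pvStepA (s, d)).1 + (bs.foldl pvStepA (s, d)).2.values.sum
        = s + (S.map (fun c => |d.getD c 0 - (List.count c bs : Int)|)).sum := by
  intro bs
  induction bs with
  | nil =>
    intro _ d s hnd hk hv
    simp only [List.foldl_nil, List.count_nil, Nat.cast_zero, sub_zero]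
    rw [PySem.Dict.values_eq_map_keys d hnd 0]
    rw [sum_map_extend (fun c => d.getD c 0) d.keys S hnd hS hk
      (fun c _ hc => PySem.Dict.getD_of_not_contains d 0
        (by rw [← Bool.not_eq_true, PySem.Dict.contains_iff_mem_keys]; exact hc))]
    congr 1
    exact congrArg List.sum (List.map_congr_left (fun c _ => (abs_of_nonneg (hv c)).symm))
  | cons j bs ih =>
    intro hb d s hnd hk hv
    have hbj : j ∈ S := hb j (List.mem_cons_self)
    have hb' : ∀ c ∈ bs, c ∈ S := fun c hc => hb c (List.mem_cons_of_mem _ hc)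
    rw [List.foldl_cons]
    by_cases h : d.getD j 0 ≠ 0
    · have hstep : pvStepA (s, d) j = (s, d.insert j (d.getD j 0 - 1)) := by
        simp [pvStepA, h]
      rw [hstep]
      rw [ih hb' _ s (PySem.Dict.nodup_keys_insert d j _ hnd)
        (fun k hkm => by rcases (PySem.Dict.mem_keys_insert d j k _).mp hkm with h1 | h1
                         · exact h1 ▸ hbj
                         · exact hk k h1)
        (fun c => by rw [PySem.Dict.getD_insert]
                     split_ifs with hc
                     · have := hv j; omega
                     · exact hv c)]
      congr 2
      apply List.map_congr_left
      intro c _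
      rw [PySem.Dict.getD_insert]
      by_cases hc : c = j
      · subst hc
        simp only [List.count_cons, BEq.rfl, if_pos]
        push_cast
        congr 1
        ring
      · simp only [if_neg hc, List.count_cons, beq_iff_eq]
        rw [if_neg (fun hh => hc hh.symm)]
        norm_num
    · rw [not_not] at h
      have hstep : pvStepA (s, d) j = (s + 1, d) := by simp [pvStepA, h]
      rw [hstep]
      rw [ih hb' d (s + 1) hnd hk hv]
      have hmap : ∀ c ∈ S, |d.getD c 0 - (List.count c (j :: bs) : Int)|
          = |d.getD c 0 - (List.count c bs : Int)| + (if c == j then 1 else 0) := by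
        intro c _
        by_cases hc : c = j
        · subst hc
          rw [h]
          simp only [List.count_cons, BEq.rfl, if_pos]
          push_cast
          rw [zero_sub, zero_sub, abs_neg, abs_neg,
            abs_of_nonneg (by positivity), abs_of_nonneg (by positivity)]
        · simp only [List.count_cons, beq_iff_eq]
          rw [if_neg (fun hh => hc hh.symm), if_neg (by simpa using hc)]
          norm_num
      rw [List.map_congr_left hmap, PySem.List.sum_map_add_int,
        PySem.List.sum_map_ite_one_zero]
      have : List.countP (fun c => c == j) S = List.count j S := rfl
      rw [this, List.count_eq_one_of_mem hS hbj]
      push_cast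
      ring

-- ===== VERDICT (by name: the statement is the Claim_ definition above) =====

theorem make_anagram_spec : Claim_equal_make_anagram := by
  intro a b _
  unfold Spec_make_anagram make_anagram make_anagram_alt
  simp only [PySem.Dict.foldl_insert_getD_add_one_eq_counter]
  have hS : (PySem.Set.ofList (a.toList ++ b.toList)).Nodup := PySem.Set.nodup_ofList _
  have hb : ∀ c ∈ b.toList, c ∈ PySem.Set.ofList (a.toList ++ b.toList) := fun c hc =>
    (PySem.Set.mem_ofList _ _).mpr (List.mem_append.mpr (Or.inr hc))
  have hk : ∀ k ∈ (PySem.Dict.counter a.toList).keys, k ∈ PySem.Set.ofList (a.toList ++ b.toList) := by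
    intro k hkm
    rw [PySem.Dict.keys_counter, PySem.Set.mem_ofList] at hkm
    exact (PySem.Set.mem_ofList _ _).mpr (List.mem_append.mpr (Or.inl hkm))
  have hv : ∀ c, 0 ≤ (PySem.Dict.counter a.toList).getD c 0 := by
    intro c; rw [PySem.Dict.getD_counter]; positivity
  have key := loopA_eval (PySem.Set.ofList (a.toList ++ b.toList)) hS b.toList hb
    (PySem.Dict.counter a.toList) 0 (PySem.Dict.nodup_keys_counter _) hk hv
  simp only [PySem.Dict.getD_counter, zero_add] at key
  exact key
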